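-- pv_equiv track=rewrite | github.com/WesleyT4N/advent-of-code | 2022/day-14/p2.py | _add_rock
-- ===== SOURCE A (Python) =====
-- Coord = tuple[int, int]
--
-- Cave = set(Coord)  # cave represented as a set of coords
--
-- def _add_rock(rock: list[Coord], cave: Cave) -> Cave:
--     for i, r in enumerate(rock):
--         rx, ry = r
--         cave.add((rx, ry))
--         if i < len(rock) - 1:
--             next_r = rock[i + 1]
--             nx, ny = next_r
--             dx, dy = nx - rx, ny - ry
--             if dx:
--                 if nx > rx:
--                     for x in range(rx, nx):
--                         cave.add((x, ry))
--                 else: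
--                     for x in range(rx, nx - 1, -1):
--                         cave.add((x, ry))
--             elif dy:
--                 if ny > ry:
--                     for y in range(ry, ny):
--                         cave.add((rx, y))
--                 else:
--                     for y in range(ry, ny - 1, -1):
--                         cave.add((rx, y))
--     return cave
-- ===== SOURCE B (Python) =====
-- def _trail(rock):
--     # pure recursive generator of the rock path: all cells in path order
--     # (duplicates allowed); each segment is filled inclusively with one signed step
--     if len(rock) < 2:
--         return list(rock)
--     (rx, ry), (nx, ny) = rock[0], rock[1]
--     if rx != nx:
--         s = 1 if nx > rx else -1
--         seg = [(x, ry) for x in range(rx, nx + s, s)]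
--     else:
--         s = 1 if ny > ry else -1
--         seg = [(rx, y) for y in range(ry, ny + s, s)]
--     return seg + _trail(rock[1:])
--
--
-- def _add_rock(rock, cave):
--     # staged: generate the whole trail purely, then one bulk insert
--     cave.update(_trail(rock))
--     return cave
-- ===== Notes on version B (the rewrite author's own statement) =====
-- stated objective: alternative
-- what changed: A mutates the cave inside an indexed loop with four directional half-open range branches; B is staged: a pure recursive generator builds the whole rock trail as one list of cells in path order (segments filled inclusively with a single signed step), and the cave is updated once with that list.
-- outside the precondition, e.g. on _add_rock([(0, 0), (1, 1)], set()): A returns {(1, 1), (0, 0)}, B returns {(1, 0), (1, 1), (0, 0)}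
import Mathlib
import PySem

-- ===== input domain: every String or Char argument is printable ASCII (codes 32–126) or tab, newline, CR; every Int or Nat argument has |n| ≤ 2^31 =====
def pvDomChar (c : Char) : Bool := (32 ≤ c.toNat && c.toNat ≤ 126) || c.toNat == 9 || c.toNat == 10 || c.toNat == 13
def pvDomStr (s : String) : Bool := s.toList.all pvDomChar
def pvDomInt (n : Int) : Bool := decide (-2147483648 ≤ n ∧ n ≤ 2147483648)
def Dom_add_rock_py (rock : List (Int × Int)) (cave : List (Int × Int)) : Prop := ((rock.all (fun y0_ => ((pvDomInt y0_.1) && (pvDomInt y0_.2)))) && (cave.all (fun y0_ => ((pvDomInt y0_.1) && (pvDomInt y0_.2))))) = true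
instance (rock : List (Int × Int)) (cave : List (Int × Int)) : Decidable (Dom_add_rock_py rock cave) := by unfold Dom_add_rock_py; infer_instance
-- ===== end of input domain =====

-- B stages the work: a pure recursive generator builds the whole rock trail as one list of
-- cells in path order (inclusive segments, one signed step), and the cave is updated once
-- with that list, instead of A's indexed loop mutating the set inside four directional
-- range branches (objective: alternative). Both A and B mutate the cave set in place; the
-- equivalence proved here is about the returned set, which is also the mutated one.

-- ===== PORT A =====
-- the 'if dx / elif dy' directional block of A
def segA (cv : List (Int × Int)) (r n : Int × Int) : List (Int × Int) :=
  if n.1 - r.1 ≠ 0 then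
    if n.1 > r.1 then
      (PySem.List.pyRange r.1 n.1 1).foldl (fun c x => PySem.Set.add c (x, r.2)) cv
    else
      (PySem.List.pyRange r.1 (n.1 - 1) (-1)).foldl (fun c x => PySem.Set.add c (x, r.2)) cv
  else if n.2 - r.2 ≠ 0 then
    if n.2 > r.2 then
      (PySem.List.pyRange r.2 n.2 1).foldl (fun c y => PySem.Set.add c (r.1, y)) cv
    else
      (PySem.List.pyRange r.2 (n.2 - 1) (-1)).foldl (fun c y => PySem.Set.add c (r.1, y)) cv
  else cv

-- A's loop body: add the vertex; if not last, fill towards rock[i+1]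
-- (rock[i+1] is in range under the guard, so pyGetD with a dummy default is exact)
def bodyA (rock : List (Int × Int)) (cv : List (Int × Int)) (p : Int × (Int × Int)) : List (Int × Int) :=
  let cv := PySem.Set.add cv (p.2.1, p.2.2)
  if p.1 < PySem.List.len rock - 1 then
    segA cv p.2 (PySem.List.pyGetD rock (p.1 + 1) (0, 0))
  else cv

def add_rock_py (rock : List (Int × Int)) (cave : List (Int × Int)) : List (Int × Int) :=
  (PySem.List.enumerate rock 0).foldl (bodyA rock) cave

-- ===== PORT B =====
-- B's per-pair cell list: the segment r→n filled inclusively with one signed step, x-axis first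
def segList (r n : Int × Int) : List (Int × Int) :=
  if r.1 ≠ n.1 then
    let s : Int := if n.1 > r.1 then 1 else -1
    (PySem.List.pyRange r.1 (n.1 + s) s).map (fun x => (x, r.2))
  else
    let s : Int := if n.2 > r.2 then 1 else -1
    (PySem.List.pyRange r.2 (n.2 + s) s).map (fun y => (r.1, y))

-- _trail: pure recursion on the vertex list, emitting all cells in path order
def trail : List (Int × Int) → List (Int × Int)
  | [] => []
  | [r] => [r]
  | r :: n :: t => segList r n ++ trail (n :: t)

def add_rock_py_alt (rock : List (Int × Int)) (cave : List (Int × Int)) : List (Int × Int) :=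
  PySem.Set.update cave (trail rock)

-- ===== PRECONDITION & SPEC =====
-- Pre_ excludes rocks containing an x-increasing diagonal vertex pair: there A still returns
-- a value, but one that omits the segment's far cell while including it on the mirrored
-- x-decreasing diagonal — an artefact of A's half-open range arithmetic that no caller
-- relies on (the function's natural domain is axis-aligned rock paths, all admitted).
def Pre_add_rock_py (rock : List (Int × Int)) (cave : List (Int × Int)) : Prop :=
  ∀ p ∈ rock.zip (rock.drop 1), p.1.1 < p.2.1 → p.1.2 = p.2.2

instance (rock : List (Int × Int)) (cave : List (Int × Int)) : Decidable (Pre_add_rock_py rock cave) := by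
  unfold Pre_add_rock_py; infer_instance

def pvWitness_add_rock_py : (List (Int × Int)) × (List (Int × Int)) :=
  ([(498, 4), (498, 6), (496, 6)], [(500, 0)])

def Spec_add_rock_py (rock : List (Int × Int)) (cave : List (Int × Int)) (out : List (Int × Int)) : Prop := out = add_rock_py_alt rock cave
instance (rock : List (Int × Int)) (cave : List (Int × Int)) (out : List (Int × Int)) : Decidable (Spec_add_rock_py rock cave out) := by unfold Spec_add_rock_py; infer_instance

-- ===== CLAIM (what is proved, stated in full; the proofs are below) =====
def Claim_equal_add_rock_py : Prop := ∀ (rock : List (Int × Int)) (cave : List (Int × Int)), Dom_add_rock_py rock cave → Pre_add_rock_py rock cave → Spec_add_rock_py rock cave (add_rock_py rock cave)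

-- ===== LEMMAS AND PROOFS =====

-- the structural pair recursions the two ports respectively unfold to
def goA : List (Int × Int) → List (Int × Int) → List (Int × Int)
  | [], cv => cv
  | [r], cv => PySem.Set.add cv r
  | r :: n :: t, cv => goA (n :: t) (segA (PySem.Set.add cv r) r n)

def goB : List (Int × Int) → List (Int × Int) → List (Int × Int)
  | [], cv => cv
  | [r], cv => PySem.Set.add cv r
  | r :: n :: t, cv => goB (n :: t) (PySem.Set.update cv (segList r n))

theorem set_add_idem (s : List (Int × Int)) (x : Int × Int) :
    PySem.Set.add (PySem.Set.add s x) x = PySem.Set.add s x := by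
  apply PySem.Set.add_of_mem; simp [PySem.Set.mem_add]

-- A's fold over enumerate, with index lookups into pre ++ l, is goA on the suffix l
theorem foldA_eq (l pre : List (Int × Int)) (cv : List (Int × Int)) :
    (PySem.List.enumerate l (pre.length : Int)).foldl (bodyA (pre ++ l)) cv = goA l cv := by
  induction l generalizing pre cv with
  | nil => simp [PySem.List.enumerate_nil, goA]
  | cons r tail ih =>
    cases tail with
    | nil =>
      simp only [PySem.List.enumerate_cons, PySem.List.enumerate_nil, List.foldl_cons,
        List.foldl_nil, goA, bodyA]
      rw [if_neg (by simp)]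
    | cons n t =>
      simp only [PySem.List.enumerate_cons, List.foldl_cons, goA]
      have hbody : bodyA (pre ++ r :: n :: t) cv ((pre.length : Int), r)
          = segA (PySem.Set.add cv r) r n := by
        unfold bodyA
        rw [if_pos (by simp; omega)]
        have hidx : ((pre.length : Int) + 1) = ((pre.length + 1 : Nat) : Int) := by push_cast; ring
        have hget : PySem.List.pyGetD (pre ++ r :: n :: t) ((pre.length : Int) + 1) (0, 0) = n := by
          rw [hidx, PySem.List.pyGetD_natCast, List.getD_eq_getElem?_getD,
            List.getElem?_append_right (by omega)]
          simp
        rw [hget]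
      rw [hbody]
      have := ih (pre ++ [r]) (segA (PySem.Set.add cv r) r n)
      rw [List.append_assoc] at this
      simpa using this

theorem portA_eq_goA (rock cave : List (Int × Int)) : add_rock_py rock cave = goA rock cave := by
  simpa [add_rock_py] using foldA_eq rock [] cave

-- B's staged form (one bulk update of the recursively generated trail) is goB
theorem portB_eq_goB (rock cave : List (Int × Int)) : add_rock_py_alt rock cave = goB rock cave := by
  unfold add_rock_py_alt
  induction rock generalizing cave with
  | nil => simp [trail, goB]
  | cons r tail ih =>
    cases tail with
    | nil => simp [trail, goB, PySem.Set.update_cons, PySem.Set.update_nil]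
    | cons n t =>
      simp only [trail, goB, PySem.Set.update_append]
      exact ih _

-- adding the head vertex first does not change goA (goA re-adds it at once)
theorem goA_add_head (x : Int × Int) (t : List (Int × Int)) (cv : List (Int × Int)) :
    goA (x :: t) (PySem.Set.add cv x) = goA (x :: t) cv := by
  cases t with
  | nil => simp [goA]
  | cons n t' => simp [goA]

-- core per-segment lemma: on an admitted pair, updating with B's inclusive segment equals
-- A's fill (vertex first, then the directional range) followed by adding the far vertex,
-- or — when A's range already reaches the far vertex — equals A's fill outright
theorem seg_cases (cv : List (Int × Int)) (r n : Int × Int) (h : r.1 < n.1 → r.2 = n.2) :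
    PySem.Set.update cv (segList r n) = PySem.Set.add (segA (PySem.Set.add cv r) r n) n
    ∨ PySem.Set.update cv (segList r n) = segA (PySem.Set.add cv r) r n := by
  obtain ⟨rx, ry⟩ := r
  obtain ⟨nx, ny⟩ := n
  simp only at h
  by_cases hx : rx = nx
  · subst hx
    simp only [segA, segList, if_neg (by omega : ¬ (rx ≠ rx)), if_neg (by omega : ¬ (rx - rx ≠ 0))]
    by_cases hyu : ny > ry
    · left
      rw [if_pos (by omega : ny - ry ≠ 0), if_pos hyu, if_pos hyu,
        ← PySem.Set.update_map_eq_foldl_add,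
        (by ring : ny + (1:Int) = ny + 1), PySem.List.pyRange_one_succ_right (by omega : ry ≤ ny),
        PySem.List.pyRange_one_cons (by omega : ry < ny)]
      simp only [List.map_append, List.map_cons, List.map_nil, PySem.Set.update_append,
        PySem.Set.update_cons, PySem.Set.update_nil, set_add_idem]
    · right
      by_cases hyd : ny < ry
      · rw [if_pos (by omega : ny - ry ≠ 0), if_neg hyu, if_neg hyu,
          (by ring : ny + (-1:Int) = ny - 1),
          ← PySem.Set.update_map_eq_foldl_add,
          PySem.List.pyRange_neg_one_cons (by omega : ny - 1 < ry)]
        simp only [List.map_cons, PySem.Set.update_cons, set_add_idem]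
      · -- r = n: B's single-cell segment is A's vertex add
        have : ny = ry := by omega
        subst this
        rw [if_neg (by omega : ¬ (ny - ny ≠ 0)), if_neg hyu,
          (by ring : ny + (-1:Int) = ny - 1),
          PySem.List.pyRange_neg_one_cons (by omega : ny - 1 < ny),
          PySem.List.pyRange_neg_one_eq_nil (by omega : (ny:Int) - 1 ≤ ny - 1)]
        simp [PySem.Set.update_cons, PySem.Set.update_nil]
  · simp only [segA, segList, if_pos (by omega : rx ≠ nx), if_pos (by omega : nx - rx ≠ 0)]
    by_cases hxu : nx > rx
    · left
      have hy : ry = ny := h hxu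
      subst hy
      rw [if_pos hxu, if_pos hxu, ← PySem.Set.update_map_eq_foldl_add,
        (by ring : nx + (1:Int) = nx + 1), PySem.List.pyRange_one_succ_right (by omega : rx ≤ nx),
        PySem.List.pyRange_one_cons (by omega : rx < nx)]
      simp only [List.map_append, List.map_cons, List.map_nil, PySem.Set.update_append,
        PySem.Set.update_cons, PySem.Set.update_nil, set_add_idem]
    · right
      rw [if_neg hxu, if_neg hxu, (by ring : nx + (-1:Int) = nx - 1),
        ← PySem.Set.update_map_eq_foldl_add,
        PySem.List.pyRange_neg_one_cons (by omega : nx - 1 < rx)]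
      simp only [List.map_cons, PySem.Set.update_cons, set_add_idem]

theorem goA_eq_goB (l : List (Int × Int)) (cv : List (Int × Int))
    (h : ∀ p ∈ l.zip (l.drop 1), p.1.1 < p.2.1 → p.1.2 = p.2.2) :
    goA l cv = goB l cv := by
  induction l generalizing cv with
  | nil => rfl
  | cons r tail ih =>
    cases tail with
    | nil => rfl
    | cons n t =>
      simp only [List.drop_succ_cons, List.drop_zero, List.zip_cons_cons,
        List.forall_mem_cons] at h
      have htail : ∀ p ∈ (n :: t).zip ((n :: t).drop 1), p.1.1 < p.2.1 → p.1.2 = p.2.2 := by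
        simpa using h.2
      simp only [goA, goB]
      rcases seg_cases cv r n h.1 with hs | hs
      · calc goA (n :: t) (segA (PySem.Set.add cv r) r n)
            = goA (n :: t) (PySem.Set.add (segA (PySem.Set.add cv r) r n) n) :=
              (goA_add_head n t _).symm
          _ = goB (n :: t) (PySem.Set.add (segA (PySem.Set.add cv r) r n) n) := ih _ htail
          _ = goB (n :: t) (PySem.Set.update cv (segList r n)) := by rw [hs]
      · rw [hs]
        exact ih _ htail

-- ===== VERDICT (by name: the statement is the Claim_ definition above) =====
theorem add_rock_py_spec : Claim_equal_add_rock_py := by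
  intro rock cave _ hpre
  unfold Spec_add_rock_py
  rw [portA_eq_goA, portB_eq_goB, goA_eq_goB rock cave hpre]
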